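-- pv_equiv track=rewrite | github.com/IshaanSamant/Bot-Game | Bot5.py | find_crew_found_inside_detection_grid
-- ===== SOURCE A (Python) =====
-- crew_alien_grid_size = 3
--
-- def find_crew_found_inside_detection_grid(grid, aliens, x, y):
--     x_start = x - (crew_alien_grid_size // 2)
--     x_end = x - (crew_alien_grid_size // 2) + crew_alien_grid_size - 1
--     y_start = y - (crew_alien_grid_size // 2)
--     y_end = y - (crew_alien_grid_size // 2) + crew_alien_grid_size - 1
--
--     for i in range(x_start, x_end + 1):
--         for j in range(y_start, y_end + 1):
--             if (i, j) in aliens: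
--                 return True
--     return False
-- ===== SOURCE B (Python) =====
-- def find_crew_found_inside_detection_grid(grid, aliens, x, y):
--     for a in aliens:
--         if x - 1 <= a[0] <= x + 1 and y - 1 <= a[1] <= y + 1:
--             return True
--     return False
-- ===== Notes on version B (the rewrite author's own statement) =====
-- stated objective: alternative
-- what changed: B inverts the iteration: instead of scanning the 9 grid cells and testing each against the aliens list, it makes one pass over the aliens and tests each against the 3x3 bounds with comparisons.
import Mathlib
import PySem

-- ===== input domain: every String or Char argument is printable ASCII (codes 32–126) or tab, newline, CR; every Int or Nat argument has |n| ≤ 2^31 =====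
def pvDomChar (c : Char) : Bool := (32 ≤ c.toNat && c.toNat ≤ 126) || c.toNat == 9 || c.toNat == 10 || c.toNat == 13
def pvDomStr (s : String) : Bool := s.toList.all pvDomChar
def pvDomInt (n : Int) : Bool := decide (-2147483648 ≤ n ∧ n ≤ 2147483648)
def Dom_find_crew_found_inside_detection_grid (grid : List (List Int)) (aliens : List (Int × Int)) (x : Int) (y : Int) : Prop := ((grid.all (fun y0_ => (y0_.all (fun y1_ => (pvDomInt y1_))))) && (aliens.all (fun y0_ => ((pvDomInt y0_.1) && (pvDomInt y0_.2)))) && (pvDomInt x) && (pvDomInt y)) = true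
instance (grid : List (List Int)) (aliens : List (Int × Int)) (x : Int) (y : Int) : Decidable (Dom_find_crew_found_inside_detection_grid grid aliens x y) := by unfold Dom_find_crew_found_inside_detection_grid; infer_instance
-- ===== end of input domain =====

-- B replaces A's scan of the 9 neighbour cells (membership test per cell) by one pass over the
-- aliens list with bound comparisons; alternative decomposition, same asymptotic cost.


-- ===== PORT A =====
def crew_alien_grid_size : Int := 3

def find_crew_found_inside_detection_grid (grid : List (List Int)) (aliens : List (Int × Int)) (x : Int) (y : Int) : Bool :=
  let x_start := x - (PySem.Int.floordiv crew_alien_grid_size 2)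
  let x_end := x - (PySem.Int.floordiv crew_alien_grid_size 2) + crew_alien_grid_size - 1
  let y_start := y - (PySem.Int.floordiv crew_alien_grid_size 2)
  let y_end := y - (PySem.Int.floordiv crew_alien_grid_size 2) + crew_alien_grid_size - 1
  (PySem.List.pyRange x_start (x_end + 1) 1).any (fun i =>
    (PySem.List.pyRange y_start (y_end + 1) 1).any (fun j =>
      aliens.contains (i, j)))

-- ===== PORT B =====
def find_crew_found_inside_detection_grid_alt (grid : List (List Int)) (aliens : List (Int × Int)) (x : Int) (y : Int) : Bool :=
  aliens.any (fun a =>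
    decide (x - 1 ≤ a.1) && decide (a.1 ≤ x + 1) && decide (y - 1 ≤ a.2) && decide (a.2 ≤ y + 1))

-- ===== PRECONDITION & SPEC =====
def Spec_find_crew_found_inside_detection_grid (grid : List (List Int)) (aliens : List (Int × Int)) (x : Int) (y : Int) (out : Bool) : Prop := out = find_crew_found_inside_detection_grid_alt grid aliens x y
instance (grid : List (List Int)) (aliens : List (Int × Int)) (x : Int) (y : Int) (out : Bool) : Decidable (Spec_find_crew_found_inside_detection_grid grid aliens x y out) := by unfold Spec_find_crew_found_inside_detection_grid; infer_instance

-- ===== CLAIM (what is proved, stated in full; the proofs are below) =====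
def Claim_equal_find_crew_found_inside_detection_grid : Prop := ∀ (grid : List (List Int)) (aliens : List (Int × Int)) (x : Int) (y : Int), Dom_find_crew_found_inside_detection_grid grid aliens x y → Spec_find_crew_found_inside_detection_grid grid aliens x y (find_crew_found_inside_detection_grid grid aliens x y)

-- ===== LEMMAS AND PROOFS =====

theorem pyRange3 (a : Int) : PySem.List.pyRange a (a + 3) 1 = [a, a + 1, a + 2] := by
  rw [PySem.List.pyRange_one_cons (by omega), PySem.List.pyRange_one_cons (by omega),
      PySem.List.pyRange_one_cons (by omega), PySem.List.pyRange_one]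
  simp
  omega

-- ===== VERDICT (by name: the statement is the Claim_ definition above) =====
theorem find_crew_found_inside_detection_grid_spec : Claim_equal_find_crew_found_inside_detection_grid := by
  intro grid aliens x y _
  show find_crew_found_inside_detection_grid grid aliens x y = _
  unfold find_crew_found_inside_detection_grid find_crew_found_inside_detection_grid_alt
  simp only [crew_alien_grid_size, PySem.Int.floordiv]
  have h32 : Int.fdiv 3 2 = 1 := by decide
  rw [h32, show x - 1 + 3 - 1 + 1 = (x - 1) + 3 by ring, show y - 1 + 3 - 1 + 1 = (y - 1) + 3 by ring,
      pyRange3, pyRange3]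
  rw [Bool.eq_iff_iff]
  simp only [List.any_eq_true, List.contains_iff_mem, Bool.and_eq_true, decide_eq_true_eq,
    List.mem_cons, List.not_mem_nil, or_false]
  constructor
  · rintro ⟨i, hi, j, hj, hmem⟩
    refine ⟨(i, j), hmem, ?_⟩
    simp only []
    omega
  · rintro ⟨a, ha, ⟨⟨h1, h2⟩, h3⟩, h4⟩
    exact ⟨a.1, by omega, a.2, by omega, by simpa using ha⟩
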